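-- pv_equiv track=rewrite | github.com/junjuning/Algorithm_python | Baekjoon/test/test05.py | min_sum_of_differences
-- ===== SOURCE A (Python) =====
-- def count_groups_with_max_min_diff(a, max_min_diff):
--     count = 1  # 첫번째 그룹은 항상 존재하므로 1로 초기화합니다.
--     curr_min, curr_max = a[0], a[0]
--     for num in a:
--         curr_min = min(curr_min, num)
--         curr_max = max(curr_max, num)
--         if curr_max - curr_min > max_min_diff:
--             curr_min, curr_max = num, num
--             count += 1
--     return count
--
-- def min_sum_of_differences(a, k):
--     start, end = 0, max(a) - min(a)
--     while start <= end:
--         mid = (start + end) // 2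
--         if count_groups_with_max_min_diff(a, mid) <= k:
--             end = mid - 1
--         else:
--             start = mid + 1
--     return start
-- ===== SOURCE B (Python) =====
-- def count_and_next_spread(a, max_min_diff):
--     # one greedy pass: the number of groups, plus the smallest window spread
--     # that exceeded max_min_diff (None if no window ever did)
--     count = 1
--     curr_min, curr_max = a[0], a[0]
--     nxt = None
--     for num in a:
--         curr_min = min(curr_min, num)
--         curr_max = max(curr_max, num)
--         spread = curr_max - curr_min
--         if spread > max_min_diff:
--             if nxt is None or spread < nxt:
--                 nxt = spread
--             curr_min, curr_max = num, num
--             count += 1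
--     return count, nxt
--
-- def min_sum_of_differences(a, k):
--     top = max(a) - min(a)
--     d = 0
--     while True:
--         count, nxt = count_and_next_spread(a, d)
--         if count <= k:
--             return d
--         if nxt is None:
--             return top + 1
--         d = nxt
-- ===== Notes on version B (the rewrite author's own statement) =====
-- stated objective: alternative
-- what changed: Replaces the binary search over the answer with an adaptive forward search: one greedy pass also records the smallest window spread exceeding the current diff d, and d jumps directly to that next breakpoint until the grouping needs at most k groups (returning max(a)-min(a)+1 when it never does); correctness rests on the monotonicity and piecewise constancy of the greedy group count, which the Lean proof establishes.
import Mathlib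
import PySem

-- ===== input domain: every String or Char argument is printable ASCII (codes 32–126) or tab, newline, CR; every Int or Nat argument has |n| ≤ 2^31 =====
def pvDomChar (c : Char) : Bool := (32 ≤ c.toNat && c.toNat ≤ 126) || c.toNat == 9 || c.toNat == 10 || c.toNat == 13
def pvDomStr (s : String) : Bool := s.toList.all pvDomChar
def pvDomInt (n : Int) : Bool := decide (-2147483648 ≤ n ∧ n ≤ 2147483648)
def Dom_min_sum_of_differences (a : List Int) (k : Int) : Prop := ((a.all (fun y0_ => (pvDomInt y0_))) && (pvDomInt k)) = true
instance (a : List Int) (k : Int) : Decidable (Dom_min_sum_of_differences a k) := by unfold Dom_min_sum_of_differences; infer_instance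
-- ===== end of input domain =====

-- B replaces A's binary search over the answer with an adaptive scan that jumps to the next breakpoint spread; alternative algorithm, not claimed faster.


-- ===== PORT A =====
-- Source A's helper: one greedy pass, counting groups
def cgStep (d : Int) (s : Int × Int × Int) (num : Int) : Int × Int × Int :=
  let mn := min s.2.1 num
  let mx := max s.2.2 num
  if mx - mn > d then (s.1 + 1, num, num) else (s.1, mn, mx)

def count_groups_with_max_min_diff (a : List Int) (d : Int) : Int :=
  let h := (PySem.List.pyGet? a 0).getD 0   -- a[0]; IndexError on [] is excluded by Pre_
  (a.foldl (cgStep d) (1, h, h)).1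

-- A's while-loop: binary search on [start, end]
def msLoop (a : List Int) (k : Int) (s e : Int) : Int :=
  if hse : s ≤ e then
    -- mid = (start + end) // 2, inlined at its three uses
    if count_groups_with_max_min_diff a (PySem.Int.floordiv (s + e) 2) ≤ k then
      msLoop a k s (PySem.Int.floordiv (s + e) 2 - 1)
    else msLoop a k (PySem.Int.floordiv (s + e) 2 + 1) e
  else s
termination_by (e + 1 - s).toNat
decreasing_by
  all_goals
    have hb := PySem.Int.floordiv_two_mid_bounds (lo := s) (hi := e) hse
    omega

def min_sum_of_differences (a : List Int) (k : Int) : Int :=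
  let e := ((PySem.List.max? a (fun x => x)).getD 0) - ((PySem.List.min? a (fun x => x)).getD 0)
  msLoop a k 0 e

-- ===== PORT B =====
-- Source B's helper: the same greedy pass, also recording the smallest window
-- spread that exceeded the allowed diff (the next breakpoint), as an Option
def cnStep (d : Int) (s : Int × Int × Int × Option Int) (num : Int) : Int × Int × Int × Option Int :=
  let mn := min s.2.1 num
  let mx := max s.2.2.1 num
  let sp := mx - mn
  if sp > d then
    (s.1 + 1, num, num,
      match s.2.2.2 with
      | none => some sp
      | some v => if sp < v then some sp else some v)
  else (s.1, mn, mx, s.2.2.2)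

def count_and_next_spread (a : List Int) (d : Int) : Int × Option Int :=
  let h := (PySem.List.pyGet? a 0).getD 0   -- a[0]; IndexError on [] is excluded by Pre_
  let r := a.foldl (cnStep d) (1, h, h, none)
  (r.1, r.2.2.2)

-- top = max(a) - min(a), as a function of the argument (also the termination measure)
def msTop (a : List Int) : Int :=
  ((PySem.List.max? a (fun x => x)).getD 0) - ((PySem.List.min? a (fun x => x)).getD 0)

-- the recorded next breakpoint always exceeds d (every recorded spread does)
theorem cnFold_nxt_gt (d : Int) :
    ∀ (rest : List Int) (s : Int × Int × Int × Option Int),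
      (∀ v, s.2.2.2 = some v → d < v) →
      ∀ v, (rest.foldl (cnStep d) s).2.2.2 = some v → d < v := by
  intro rest
  induction rest with
  | nil => intro s hs v hv; exact hs v hv
  | cons num t ih =>
      intro s hs v hv
      refine ih _ ?_ v hv
      obtain ⟨c, mn, mx, nx⟩ := s
      unfold cnStep
      dsimp only at *
      split_ifs with h1
      · cases nx with
        | none => intro w hw; simp at hw; omega
        | some u =>
            intro w hw
            dsimp only at hw
            split_ifs at hw <;> simp at hw <;> [omega; (have := hs u rfl; omega)]
      · exact hs

-- the recorded next breakpoint is at most hi - lo when all data lies in [lo, hi]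
theorem cnFold_nxt_le (d lo hi : Int) :
    ∀ (rest : List Int) (s : Int × Int × Int × Option Int),
      (∀ x ∈ rest, lo ≤ x ∧ x ≤ hi) → lo ≤ s.2.1 → s.2.2.1 ≤ hi →
      (∀ v, s.2.2.2 = some v → v ≤ hi - lo) →
      ∀ v, (rest.foldl (cnStep d) s).2.2.2 = some v → v ≤ hi - lo := by
  intro rest
  induction rest with
  | nil => intro s _ _ _ hs v hv; exact hs v hv
  | cons num t ih =>
      intro s hmem hlo hhi hs v hv
      have hnum := hmem num (List.mem_cons_self)
      have hmem' : ∀ x ∈ t, lo ≤ x ∧ x ≤ hi := fun x hx => hmem x (List.mem_cons_of_mem _ hx)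
      obtain ⟨c, mn, mx, nx⟩ := s
      dsimp only at hlo hhi hs
      simp only [List.foldl_cons] at hv
      refine ih (cnStep d (c, mn, mx, nx) num) hmem' ?_ ?_ ?_ v hv
      · unfold cnStep; dsimp only; split_ifs <;> dsimp only <;> omega
      · unfold cnStep; dsimp only; split_ifs <;> dsimp only <;> omega
      · unfold cnStep
        dsimp only
        split_ifs with h1
        · cases nx with
          | none => intro w hw; simp at hw; omega
          | some u =>
              intro w hw
              dsimp only at hw
              split_ifs at hw <;> simp at hw <;> [omega; (have := hs u rfl; omega)]
        · exact hs

-- the breakpoint B jumps to lies strictly above d and at most msTop a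
theorem jump_next_bound (a : List Int) (d nd : Int)
    (h : (count_and_next_spread a d).2 = some nd) : d < nd ∧ nd ≤ msTop a := by
  cases a with
  | nil => simp [count_and_next_spread] at h
  | cons x t =>
      unfold count_and_next_spread at h
      simp only [PySem.List.pyGet?_zero_cons, Option.getD_some] at h
      constructor
      · exact cnFold_nxt_gt d (x :: t) (1, x, x, none) (by intro v hv; simp at hv) nd h
      · have hmax := PySem.List.le_foldl_max t x
        have hmin := PySem.List.foldl_min_le t x
        have hmem : ∀ y ∈ x :: t, t.foldl min x ≤ y ∧ y ≤ t.foldl max x := by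
          intro y hy
          rcases List.mem_cons.mp hy with rfl | hy'
          · exact ⟨hmin.1, hmax.1⟩
          · exact ⟨hmin.2 y hy', hmax.2 y hy'⟩
        have := cnFold_nxt_le d (t.foldl min x) (t.foldl max x) (x :: t)
          (1, x, x, none) hmem hmin.1 hmax.1 (by intro v hv; simp at hv) nd h
        unfold msTop
        rw [PySem.List.max?_id_cons, PySem.List.min?_id_cons]
        simpa using this

-- B's while-loop: greedy pass, then jump d to the next breakpoint
def jumpLoop (a : List Int) (k d : Int) : Int :=
  let cn := count_and_next_spread a d
  if cn.1 ≤ k then d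
  else
    match hnx : cn.2 with
    | none => msTop a + 1
    | some nd => jumpLoop a k nd
termination_by (msTop a - d).toNat
decreasing_by
  have hb := jump_next_bound a d nd hnx
  omega

def min_sum_of_differences_alt (a : List Int) (k : Int) : Int :=
  jumpLoop a k 0

-- ===== PRECONDITION & SPEC =====
-- Pre_ excludes only the empty list, on which both A and B raise (max()/a[0] on an empty sequence).
def Pre_min_sum_of_differences (a : List Int) (k : Int) : Prop := a ≠ []
instance (a : List Int) (k : Int) : Decidable (Pre_min_sum_of_differences a k) := by unfold Pre_min_sum_of_differences; infer_instance
def pvWitness_min_sum_of_differences : List Int × Int := ([1, 5, 2, 9], 2)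

def Spec_min_sum_of_differences (a : List Int) (k : Int) (out : Int) : Prop := out = min_sum_of_differences_alt a k
instance (a : List Int) (k : Int) (out : Int) : Decidable (Spec_min_sum_of_differences a k out) := by unfold Spec_min_sum_of_differences; infer_instance

-- ===== CLAIM (what is proved, stated in full; the proofs are below) =====
def Claim_equal_min_sum_of_differences : Prop := ∀ (a : List Int) (k : Int), Dom_min_sum_of_differences a k → Pre_min_sum_of_differences a k → Spec_min_sum_of_differences a k (min_sum_of_differences a k)

-- ===== LEMMAS AND PROOFS =====

-- Invariant relating the greedy pass at threshold d (state s) and at a larger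
-- threshold d' (state s'): fewer groups, and at equal counts a smaller window.
def cgInv (s s' : Int × Int × Int) : Prop :=
  s'.1 ≤ s.1 ∧ (s'.1 = s.1 → s.2.1 ≤ s'.2.1 ∧ s'.2.2 ≤ s.2.2)

theorem cgInv_step (d d' : Int) (hd : d ≤ d') (s s' : Int × Int × Int) (x : Int)
    (h : cgInv s s') : cgInv (cgStep d s x) (cgStep d' s' x) := by
  obtain ⟨c, mn, mx⟩ := s
  obtain ⟨c', mn', mx'⟩ := s'
  unfold cgInv cgStep at *
  dsimp only at *
  split_ifs <;> dsimp only at * <;> constructor <;> omega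

theorem cgInv_foldl (d d' : Int) (hd : d ≤ d') :
    ∀ (l : List Int) (s s' : Int × Int × Int), cgInv s s' →
      cgInv (l.foldl (cgStep d) s) (l.foldl (cgStep d') s') := by
  intro l
  induction l with
  | nil => intro s s' h; exact h
  | cons x t ih =>
      intro s s' h
      exact ih _ _ (cgInv_step d d' hd s s' x h)

-- monotonicity of the greedy group count in the allowed diff
theorem cg_mono (a : List Int) (d d' : Int) (hd : d ≤ d') :
    count_groups_with_max_min_diff a d' ≤ count_groups_with_max_min_diff a d := by
  unfold count_groups_with_max_min_diff
  exact (cgInv_foldl d d' hd a _ _ ⟨le_refl _, fun _ => ⟨le_refl _, le_refl _⟩⟩).1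

theorem P_mono (a : List Int) (k d d' : Int) (hd : d ≤ d')
    (h : count_groups_with_max_min_diff a d ≤ k) :
    count_groups_with_max_min_diff a d' ≤ k :=
  le_trans (cg_mono a d d' hd) h

-- characterisation of A's binary-search loop
theorem msLoop_spec (a : List Int) (k E : Int) :
    ∀ (s e : Int), 0 ≤ s → s ≤ e + 1 → e ≤ E →
      (∀ d, 0 ≤ d → d < s → ¬ (count_groups_with_max_min_diff a d ≤ k)) →
      (∀ d, e < d → d ≤ E → count_groups_with_max_min_diff a d ≤ k) →
      (0 ≤ msLoop a k s e ∧ msLoop a k s e ≤ E + 1 ∧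
       (∀ d, 0 ≤ d → d < msLoop a k s e → ¬ (count_groups_with_max_min_diff a d ≤ k)) ∧
       (∀ d, msLoop a k s e ≤ d → d ≤ E → count_groups_with_max_min_diff a d ≤ k)) := by
  intro s e
  induction s, e using msLoop.induct a k with
  | case1 s e hse hP ih =>
      intro hs0 hse1 heE hlow hhigh
      have hb := PySem.Int.floordiv_two_mid_bounds (lo := s) (hi := e) hse
      rw [msLoop]
      simp only [dif_pos hse, if_pos hP]
      exact ih hs0 (by omega) (by omega) hlow
        (fun d hd1 hd2 => P_mono a k (PySem.Int.floordiv (s + e) 2) d (by omega) hP)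
  | case2 s e hse hP ih =>
      intro hs0 hse1 heE hlow hhigh
      have hb := PySem.Int.floordiv_two_mid_bounds (lo := s) (hi := e) hse
      rw [msLoop]
      simp only [dif_pos hse, if_neg hP]
      exact ih (by omega) (by omega) heE
        (fun d hd1 hd2 => fun hPd => hP (P_mono a k d (PySem.Int.floordiv (s + e) 2) (by omega) hPd))
        hhigh
  | case3 s e hse =>
      intro hs0 hse1 heE hlow hhigh
      rw [msLoop]
      simp only [dif_neg hse]
      exact ⟨hs0, by omega, hlow, fun d hd1 hd2 => hhigh d (by omega) hd2⟩

-- the recorded next breakpoint only decreases along the pass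
theorem cnFold_nxt_min (d : Int) :
    ∀ (rest : List Int) (s : Int × Int × Int × Option Int) (v : Int),
      s.2.2.2 = some v →
      ∃ v', (rest.foldl (cnStep d) s).2.2.2 = some v' ∧ v' ≤ v := by
  intro rest
  induction rest with
  | nil => intro s v hv; exact ⟨v, hv, le_refl v⟩
  | cons num t ih =>
      intro s v hv
      obtain ⟨c, mn, mx, nx⟩ := s
      dsimp only at hv
      subst hv
      simp only [List.foldl_cons]
      by_cases h1 : max mx num - min mn num > d
      · by_cases h2 : max mx num - min mn num < v
        · have hstep : cnStep d (c, mn, mx, some v) num =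
              (c + 1, num, num, some (max mx num - min mn num)) := by
            unfold cnStep; dsimp only; rw [if_pos h1]; simp only [if_pos h2]
          rw [hstep]
          obtain ⟨v', hv', hle⟩ := ih (c + 1, num, num, some (max mx num - min mn num)) _ rfl
          exact ⟨v', hv', by omega⟩
        · have hstep : cnStep d (c, mn, mx, some v) num = (c + 1, num, num, some v) := by
            unfold cnStep; dsimp only; rw [if_pos h1]; simp only [if_neg h2]
          rw [hstep]
          exact ih (c + 1, num, num, some v) v rfl
      · have hstep : cnStep d (c, mn, mx, some v) num =
            (c, min mn num, max mx num, some v) := by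
          unfold cnStep; dsimp only; rw [if_neg h1]
        rw [hstep]
        exact ih (c, min mn num, max mx num, some v) v rfl

-- two greedy passes agree when no breakpoint separates their thresholds:
-- if every spread the d-pass records beyond this point exceeds d'', the
-- d''-pass traverses the same states
theorem run_agree (d d'' : Int) (hd : d ≤ d'') :
    ∀ (rest : List Int) (c mn mx : Int) (nx : Option Int),
      (∀ v, (rest.foldl (cnStep d) (c, mn, mx, nx)).2.2.2 = some v → d'' < v) →
      rest.foldl (cgStep d'') (c, mn, mx) =
        ((rest.foldl (cnStep d) (c, mn, mx, nx)).1,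
         (rest.foldl (cnStep d) (c, mn, mx, nx)).2.1,
         (rest.foldl (cnStep d) (c, mn, mx, nx)).2.2.1) := by
  intro rest
  induction rest with
  | nil => intro c mn mx nx _; rfl
  | cons num t ih =>
      intro c mn mx nx hfin
      by_cases hsp : max mx num - min mn num > d
      · -- the d-pass resets; its recorded value forces d'' < spread, so the d''-pass resets too
        obtain ⟨w, hw4, hwle⟩ : ∃ w, cnStep d (c, mn, mx, nx) num = (c + 1, num, num, some w) ∧
            w ≤ max mx num - min mn num := by
          cases nx with
          | none => exact ⟨_, by unfold cnStep; dsimp only; rw [if_pos hsp], le_refl _⟩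
          | some u =>
              by_cases h2 : max mx num - min mn num < u
              · exact ⟨_, by unfold cnStep; dsimp only; rw [if_pos hsp]; simp only [if_pos h2], le_refl _⟩
              · exact ⟨u, by unfold cnStep; dsimp only; rw [if_pos hsp]; simp only [if_neg h2], by omega⟩
        obtain ⟨v', hv', hv'le⟩ := cnFold_nxt_min d t (c + 1, num, num, some w) w rfl
        have hfin' : d'' < v' := hfin v' (by simp only [List.foldl_cons, hw4]; exact hv')
        have hsp'' : max mx num - min mn num > d'' := by omega
        have h3 : cgStep d'' (c, mn, mx) num = (c + 1, num, num) := by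
          unfold cgStep; dsimp only; rw [if_pos hsp'']
        simp only [List.foldl_cons, h3, hw4]
        exact ih (c + 1) num num (some w)
          (fun v hv => hfin v (by simp only [List.foldl_cons, hw4]; exact hv))
      · -- no reset at d, hence none at d'' either
        have hsp'' : ¬ (max mx num - min mn num > d'') := by omega
        have h3 : cgStep d'' (c, mn, mx) num = (c, min mn num, max mx num) := by
          unfold cgStep; dsimp only; rw [if_neg hsp'']
        have h4 : cnStep d (c, mn, mx, nx) num = (c, min mn num, max mx num, nx) := by
          unfold cnStep; dsimp only; rw [if_neg hsp]
        simp only [List.foldl_cons, h3, h4]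
        exact ih c (min mn num) (max mx num) nx
          (fun v hv => hfin v (by simp only [List.foldl_cons, h4]; exact hv))

-- the count B's helper returns is A's count, at the same and at every
-- threshold up to (excluding) the recorded next breakpoint
theorem count_eq (a : List Int) (d d'' : Int) (hd : d ≤ d'')
    (hfin : ∀ v, (count_and_next_spread a d).2 = some v → d'' < v) :
    count_groups_with_max_min_diff a d'' = (count_and_next_spread a d).1 := by
  unfold count_groups_with_max_min_diff count_and_next_spread at *
  dsimp only at *
  rw [run_agree d d'' hd a 1 _ _ none hfin]

theorem count_eq_self (a : List Int) (d : Int) :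
    count_groups_with_max_min_diff a d = (count_and_next_spread a d).1 :=
  count_eq a d d (le_refl d) (by
    intro v hv
    cases a with
    | nil => simp [count_and_next_spread] at hv
    | cons x t =>
        unfold count_and_next_spread at hv
        simp only [PySem.List.pyGet?_zero_cons, Option.getD_some] at hv
        exact cnFold_nxt_gt d (x :: t) (1, x, x, none) (by intro w hw; simp at hw) v hv)

-- B's jump loop reaches exactly the value characterised by msLoop_spec
theorem jumpLoop_spec (a : List Int) (k r : Int)
    (hrE : r ≤ msTop a + 1)
    (hlow : ∀ d, 0 ≤ d → d < r → ¬ (count_groups_with_max_min_diff a d ≤ k))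
    (hhigh : ∀ d, r ≤ d → d ≤ msTop a → count_groups_with_max_min_diff a d ≤ k) :
    ∀ (n : Nat) (d : Int), (msTop a - d).toNat = n → 0 ≤ d → d ≤ r → jumpLoop a k d = r := by
  intro n
  induction n using Nat.strong_induction_on with
  | _ n ih =>
    intro d hn hd0 hdr
    rw [jumpLoop]
    split_ifs with hP
    · -- d is feasible: it must be exactly r
      have hfeas : count_groups_with_max_min_diff a d ≤ k := by rw [count_eq_self]; exact hP
      by_contra hne
      exact hlow d hd0 (by omega) hfeas
    · split
      · -- no breakpoint ahead: count is constant (and > k) from d on, so r = msTop a + 1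
        next hnx =>
        have hconst : ∀ d'' : Int, d ≤ d'' → ¬ (count_groups_with_max_min_diff a d'' ≤ k) := by
          intro d'' hdd h
          exact hP (by rw [← count_eq a d d'' hdd (by intro v hv; rw [hnx] at hv; exact absurd hv (by simp))]; exact h)
        by_contra hne
        have hrle : r ≤ msTop a := by omega
        exact hconst (max d r) (le_max_left d r)
          (hhigh (max d r) (le_max_right d r) (by omega))
      · -- jump to the breakpoint nd: count is constant (and > k) on [d, nd), so nd ≤ r
        next nd hnx =>
        have hb := jump_next_bound a d nd hnx
        have hconst : ∀ d'' : Int, d ≤ d'' → d'' < nd → ¬ (count_groups_with_max_min_diff a d'' ≤ k) := by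
          intro d'' hdd hdn h
          exact hP (by rw [← count_eq a d d'' hdd (by intro v hv; rw [hnx] at hv; simp at hv; omega)]; exact h)
        have hndr : nd ≤ r := by
          by_contra hlt
          exact hconst r hdr (by omega) (hhigh r (le_refl r) (by omega))
        exact ih (msTop a - nd).toNat (by omega) nd rfl (by omega) hndr

-- ===== VERDICT (by name: the statement is the Claim_ definition above) =====
theorem min_sum_of_differences_spec : Claim_equal_min_sum_of_differences := by
  intro a k _ hpre
  unfold Spec_min_sum_of_differences min_sum_of_differences min_sum_of_differences_alt
  have hE : 0 ≤ msTop a := by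
    obtain ⟨x, t, rfl⟩ : ∃ x t, a = x :: t := by
      cases a with
      | nil => exact absurd rfl hpre
      | cons x t => exact ⟨x, t, rfl⟩
    unfold msTop
    rw [PySem.List.max?_id_cons, PySem.List.min?_id_cons]
    have h1 := (PySem.List.foldl_min_le t x).1
    have h2 := (PySem.List.le_foldl_max t x).1
    simp only [Option.getD_some]
    omega
  obtain ⟨h0, h1, hlow, hhigh⟩ := msLoop_spec a k (msTop a) 0 (msTop a)
    (le_refl 0) (by omega) (le_refl _)
    (fun d hd1 hd2 => by omega)
    (fun d hd1 hd2 => by omega)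
  exact (jumpLoop_spec a k (msLoop a k 0 (msTop a)) h1 hlow hhigh (msTop a - 0).toNat 0 rfl (le_refl 0) h0).symm
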